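-- pv_equiv track=rewrite | github.com/Miles-Johnson/merchant-ledger | scripts/parse_recipes_json.py | is_patch_like_recipe_obj
-- ===== SOURCE A (Python) =====
-- from typing import Any, Iterable
--
-- def is_patch_like_recipe_obj(obj: dict[str, Any]) -> bool:
--     # json patch payloads often contain op/path/file and no output/ingredient-like fields
--     patch_keys = {"op", "path", "file", "value", "side", "dependson"}
--     recipe_keys = {
--         "output",
--         "ingredient",
--         "ingredients",
--         "ingredientpattern",
--         "cooksinto",
--         "smeltsinto",
--     }
--
--     keys = {str(k).lower() for k in obj.keys()}
--     return bool(keys & patch_keys) and not bool(keys & recipe_keys)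
-- ===== SOURCE B (Python) =====
-- PATCH_KEYS = frozenset({"op", "path", "file", "value", "side", "dependson"})
-- RECIPE_KEYS = frozenset({
--     "output", "ingredient", "ingredients",
--     "ingredientpattern", "cooksinto", "smeltsinto",
-- })
--
-- def is_patch_like_recipe_obj(obj):
--     # single short-circuiting pass: bail out on a recipe key, flag a patch key
--     has_patch = False
--     for k in obj.keys():
--         lk = str(k).lower()
--         if lk in RECIPE_KEYS:
--             return False
--         if lk in PATCH_KEYS:
--             has_patch = True
--     return has_patch
-- ===== Notes on version B (the rewrite author's own statement) =====
-- stated objective: simpler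
-- what changed: Replaces A's build-a-lowercased-key-set-then-two-set-intersections with one short-circuiting pass over the keys that returns False on the first recipe key and maintains a has-patch flag, materializing no intermediate set.
import Mathlib
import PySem

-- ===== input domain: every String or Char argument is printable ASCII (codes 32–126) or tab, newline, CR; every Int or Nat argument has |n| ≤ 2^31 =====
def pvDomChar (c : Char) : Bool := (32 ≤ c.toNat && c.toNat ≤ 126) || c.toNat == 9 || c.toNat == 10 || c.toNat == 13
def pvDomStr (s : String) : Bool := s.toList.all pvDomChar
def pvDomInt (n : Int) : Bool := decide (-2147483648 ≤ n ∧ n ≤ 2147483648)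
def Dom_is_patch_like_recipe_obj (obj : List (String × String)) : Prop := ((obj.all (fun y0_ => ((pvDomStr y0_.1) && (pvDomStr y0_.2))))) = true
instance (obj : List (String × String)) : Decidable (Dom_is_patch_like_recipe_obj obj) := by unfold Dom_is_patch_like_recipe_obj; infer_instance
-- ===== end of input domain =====

-- B replaces A's "materialize the lowercased-key set, then two set intersections" with
-- one short-circuiting pass keeping a boolean flag (objective: simpler).

-- ===== PORT A =====
def pvPatchKeys : PySem.Set String :=
  PySem.Set.ofList ["op", "path", "file", "value", "side", "dependson"]
def pvRecipeKeys : PySem.Set String :=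
  PySem.Set.ofList ["output", "ingredient", "ingredients", "ingredientpattern", "cooksinto", "smeltsinto"]

def is_patch_like_recipe_obj (obj : List (String × String)) : Bool :=
  -- keys = {str(k).lower() for k in obj.keys()}
  let keys : PySem.Set String := PySem.Set.ofList (obj.map (fun p => PySem.Str.lower p.1))
  -- bool(keys & patch_keys) and not bool(keys & recipe_keys)
  !(PySem.Set.inter keys pvPatchKeys).isEmpty && (PySem.Set.inter keys pvRecipeKeys).isEmpty

-- ===== PORT B =====
def pvAltLoop : List (String × String) → Bool → Bool
  | [], has_patch => has_patch
  | (k, _) :: rest, has_patch =>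
    let lk := PySem.Str.lower k
    if pvRecipeKeys.contains lk then false
    else pvAltLoop rest (has_patch || pvPatchKeys.contains lk)

def is_patch_like_recipe_obj_alt (obj : List (String × String)) : Bool :=
  pvAltLoop obj false

-- ===== PRECONDITION & SPEC =====
def Spec_is_patch_like_recipe_obj (obj : List (String × String)) (out : Bool) : Prop := out = is_patch_like_recipe_obj_alt obj
instance (obj : List (String × String)) (out : Bool) : Decidable (Spec_is_patch_like_recipe_obj obj out) := by unfold Spec_is_patch_like_recipe_obj; infer_instance

-- ===== CLAIM (what is proved, stated in full; the proofs are below) =====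
def Claim_equal_is_patch_like_recipe_obj : Prop := ∀ (obj : List (String × String)), Dom_is_patch_like_recipe_obj obj → Spec_is_patch_like_recipe_obj obj (is_patch_like_recipe_obj obj)

-- ===== LEMMAS AND PROOFS =====

-- A's "bool(keys & s)" over the lowered-key set is just an `any` over the original keys.
-- bool(s0 & t) over a Set s0 is an `any` over s0's elements
lemma pvInter_isEmpty (s t : List String) :
    (PySem.Set.inter s t).isEmpty = !(s.any t.contains) := by
  unfold PySem.Set.inter
  rw [Bool.eq_iff_iff]
  simp [List.isEmpty_iff, List.filter_eq_nil_iff, PySem.Set.contains]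

-- an `any` over the deduplicated lowered-key set is an `any` over the original pairs
lemma pvAny_ofList (obj : List (String × String)) (p : String → Bool) :
    (PySem.Set.ofList (obj.map (fun q => PySem.Str.lower q.1))).any p
      = obj.any (fun q => p (PySem.Str.lower q.1)) := by
  rw [Bool.eq_iff_iff]
  simp [List.any_eq_true, PySem.Set.mem_ofList]

lemma pvInterA (obj : List (String × String)) (s : PySem.Set String) :
    (PySem.Set.inter (PySem.Set.ofList (obj.map (fun p => PySem.Str.lower p.1))) s).isEmpty
      = !(obj.any (fun p => s.contains (PySem.Str.lower p.1))) := by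
  rw [pvInter_isEmpty, pvAny_ofList]
  simp [PySem.Set.contains]

-- B's loop in closed form.
lemma pvAltLoop_eq (obj : List (String × String)) (has : Bool) :
    pvAltLoop obj has =
      if obj.any (fun p => pvRecipeKeys.contains (PySem.Str.lower p.1)) then false
      else has || obj.any (fun p => pvPatchKeys.contains (PySem.Str.lower p.1)) := by
  induction obj generalizing has with
  | nil => simp [pvAltLoop]
  | cons hd tl ih =>
    obtain ⟨k, v⟩ := hd
    by_cases hr : PySem.Str.lower k ∈ pvRecipeKeys
    · simp [pvAltLoop, PySem.Set.contains, hr]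
    · simp [pvAltLoop, PySem.Set.contains, hr, ih]
      by_cases hp : tl.any (fun p => pvRecipeKeys.contains (PySem.Str.lower p.1)) <;>
        simp [PySem.Set.contains] at hp <;> simp [hp, Bool.or_assoc]

-- ===== VERDICT (by name: the statement is the Claim_ definition above) =====
theorem is_patch_like_recipe_obj_spec : Claim_equal_is_patch_like_recipe_obj := by
  intro obj _
  unfold Spec_is_patch_like_recipe_obj is_patch_like_recipe_obj is_patch_like_recipe_obj_alt
  show (!(PySem.Set.inter (PySem.Set.ofList (obj.map (fun p => PySem.Str.lower p.1))) pvPatchKeys).isEmpty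
          && (PySem.Set.inter (PySem.Set.ofList (obj.map (fun p => PySem.Str.lower p.1))) pvRecipeKeys).isEmpty)
        = pvAltLoop obj false
  rw [pvAltLoop_eq, pvInterA, pvInterA]
  by_cases hr : obj.any (fun p => pvRecipeKeys.contains (PySem.Str.lower p.1)) <;>
    simp [hr, Bool.and_comm]
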